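-- pv_equiv track=rewrite | github.com/pypi-data/pypi-mirror-389 | packages/ecreshore/ecreshore-1.0.1-py3-none-any.whl/ecreshore/services/digest_verification.py | _select_best_repo_digest
-- ===== SOURCE A (Python) =====
-- from typing import Optional, List, Dict, Any
--
-- def _select_best_repo_digest(
--     repo_digests: List[str], repository: str
-- ) -> Optional[str]:
--     """Select the most relevant digest from available RepoDigests.
--
--     Priority:
--     1. Digest matching the target repository
--     2. ECR digest (amazonaws.com)
--     3. Any other digest
--
--     Args:
--         repo_digests: List of repository digests
--         repository: Target repository to match
--
--     Returns:
--         Best matching digest or None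
--     """
--     if not repo_digests:
--         return None
--
--     # Extract repository name from full path (e.g., "ecr.../my-app" -> "my-app")
--     repo_name = repository.split("/")[-1] if "/" in repository else repository
--
--     # Priority 1: Exact repository match
--     for digest in repo_digests:
--         if digest.startswith(f"{repository}@") or digest.startswith(
--             f"{repo_name}@"
--         ):
--             return digest
--
--     # Priority 2: ECR digest (if pushing to ECR)
--     if "amazonaws.com" in repository:
--         for digest in repo_digests:
--             if "amazonaws.com" in digest:
--                 return digest
--
--     # Priority 3: Any digest (fallback)
--     return repo_digests[0]
-- ===== SOURCE B (Python) =====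
-- def _select_best_repo_digest(repo_digests, repository):
--     """Single pass: return a repository-name match immediately; remember the
--     first ECR digest as a fallback candidate; otherwise first digest."""
--     if not repo_digests:
--         return None
--     repo_name = repository.split("/")[-1] if "/" in repository else repository
--     ecr = None
--     for digest in repo_digests:
--         if digest.startswith(repository + "@") or digest.startswith(repo_name + "@"):
--             return digest
--         if ecr is None and "amazonaws.com" in digest:
--             ecr = digest
--     if "amazonaws.com" in repository and ecr is not None:
--         return ecr
--     return repo_digests[0]
-- ===== Notes on version B (the rewrite author's own statement) =====
-- stated objective: alternative
-- what changed: Replaces A's two sequential scans (one for repository-name matches, a second for an ECR digest) with a single pass that returns a name match immediately and records the first ECR digest in an accumulator for the fallback decision after the loop.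
import Mathlib
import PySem

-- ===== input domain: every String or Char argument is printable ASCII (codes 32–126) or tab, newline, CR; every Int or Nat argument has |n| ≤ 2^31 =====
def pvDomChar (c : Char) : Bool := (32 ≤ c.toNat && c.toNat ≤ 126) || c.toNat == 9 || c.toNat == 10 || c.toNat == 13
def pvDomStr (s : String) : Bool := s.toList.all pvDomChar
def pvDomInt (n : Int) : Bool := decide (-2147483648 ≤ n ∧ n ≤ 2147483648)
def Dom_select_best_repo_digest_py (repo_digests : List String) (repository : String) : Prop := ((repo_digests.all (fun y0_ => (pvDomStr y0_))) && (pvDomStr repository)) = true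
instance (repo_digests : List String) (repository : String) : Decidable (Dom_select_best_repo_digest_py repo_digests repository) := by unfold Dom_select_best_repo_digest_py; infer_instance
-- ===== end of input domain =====

-- B replaces A's two sequential scans with a single pass that returns a name match
-- immediately and records the first ECR digest as a fallback candidate (alternative
-- decomposition, same cost).

-- ===== PORT A =====
-- repository.split("/")[-1] if "/" in repository else repository
def pvRepoNameA (repository : String) : String :=
  if PySem.Str.isIn "/" repository then
    match PySem.List.pyGet? ((PySem.Str.split? repository "/").getD []) (-1) with
    | some x => x
    | none => ""   -- unreachable: split always yields a nonempty list
  else repository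

def select_best_repo_digest_py (repo_digests : List String) (repository : String) : Option String :=
  if repo_digests = [] then none
  else
    let repo_name := pvRepoNameA repository
    -- Priority 1: first digest matching repository or repo_name
    match repo_digests.find? (fun d =>
        PySem.Str.startswith d (repository ++ "@") || PySem.Str.startswith d (repo_name ++ "@")) with
    | some d => some d
    | none =>
      -- Priority 2: first ECR digest, if pushing to ECR
      if PySem.Str.isIn "amazonaws.com" repository then
        match repo_digests.find? (fun d => PySem.Str.isIn "amazonaws.com" d) with
        | some d => some d
        | none => PySem.List.pyGet? repo_digests 0    -- Priority 3 fallback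
      else PySem.List.pyGet? repo_digests 0           -- Priority 3 fallback

-- ===== PORT B =====
-- single pass: return a name match at once, thread the first ECR digest as accumulator
def pvAltLoop (repository repo_name : String) (repo_digests : List String) :
    List String → Option String → Option String
  | [], ecr =>
    if PySem.Str.isIn "amazonaws.com" repository && ecr.isSome then ecr
    else PySem.List.pyGet? repo_digests 0
  | d :: rest, ecr =>
    if PySem.Str.startswith d (repository ++ "@") || PySem.Str.startswith d (repo_name ++ "@") then
      some d
    else
      pvAltLoop repository repo_name repo_digests rest
        (if ecr.isNone && PySem.Str.isIn "amazonaws.com" d then some d else ecr)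

def select_best_repo_digest_py_alt (repo_digests : List String) (repository : String) : Option String :=
  if repo_digests = [] then none
  else
    let repo_name :=
      if PySem.Str.isIn "/" repository then
        match PySem.List.pyGet? ((PySem.Str.split? repository "/").getD []) (-1) with
        | some x => x
        | none => ""
      else repository
    pvAltLoop repository repo_name repo_digests repo_digests none

-- ===== PRECONDITION & SPEC =====
def Spec_select_best_repo_digest_py (repo_digests : List String) (repository : String) (out : Option String) : Prop := out = select_best_repo_digest_py_alt repo_digests repository
instance (repo_digests : List String) (repository : String) (out : Option String) : Decidable (Spec_select_best_repo_digest_py repo_digests repository out) := by unfold Spec_select_best_repo_digest_py; infer_instance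

-- ===== CLAIM (what is proved, stated in full; the proofs are below) =====
def Claim_equal_select_best_repo_digest_py : Prop := ∀ (repo_digests : List String) (repository : String), Dom_select_best_repo_digest_py repo_digests repository → Spec_select_best_repo_digest_py repo_digests repository (select_best_repo_digest_py repo_digests repository)

-- ===== LEMMAS AND PROOFS =====

-- The single pass with accumulator ecr equals: first priority-1 match, else the
-- ECR decision over (ecr <|> first ECR digest of the remaining list).
theorem pvAltLoop_eq (repository repo_name : String) (ds : List String)
    (l : List String) (ecr : Option String) :
    pvAltLoop repository repo_name ds l ecr =
      match l.find? (fun d =>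
          PySem.Str.startswith d (repository ++ "@") || PySem.Str.startswith d (repo_name ++ "@")) with
      | some d => some d
      | none =>
        let c := ecr.or (l.find? (fun d => PySem.Str.isIn "amazonaws.com" d))
        if PySem.Str.isIn "amazonaws.com" repository && c.isSome then c
        else PySem.List.pyGet? ds 0 := by
  induction l generalizing ecr with
  | nil =>
    simp only [pvAltLoop, List.find?_nil, Option.or_none]
  | cons d rest ih =>
    by_cases h1 : (PySem.Str.startswith d (repository ++ "@")
        || PySem.Str.startswith d (repo_name ++ "@")) = true
    · rw [List.find?_cons_of_pos (p := fun d => PySem.Str.startswith d (repository ++ "@") || PySem.Str.startswith d (repo_name ++ "@")) h1]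
      simp only [pvAltLoop, if_pos h1]
    · rw [List.find?_cons_of_neg (p := fun d => PySem.Str.startswith d (repository ++ "@") || PySem.Str.startswith d (repo_name ++ "@")) h1]
      simp only [pvAltLoop, if_neg h1, ih]
      have hc : (if (ecr.isNone && PySem.Str.isIn "amazonaws.com" d) = true then some d else ecr).or
            (rest.find? (fun d => PySem.Str.isIn "amazonaws.com" d))
          = ecr.or (List.find? (fun d => PySem.Str.isIn "amazonaws.com" d) (d :: rest)) := by
        cases ecr with
        | some a => simp only [Option.isNone_some, Bool.false_and, Bool.false_eq_true,
            if_false, Option.some_or]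
        | none =>
          by_cases h2 : PySem.Str.isIn "amazonaws.com" d = true
          · rw [List.find?_cons_of_pos (p := fun d => PySem.Str.isIn "amazonaws.com" d) h2]
            simp only [Option.isNone_none, Bool.true_and, h2, if_true, Option.some_or,
              Option.none_or]
          · rw [List.find?_cons_of_neg (p := fun d => PySem.Str.isIn "amazonaws.com" d) h2]
            simp only [Option.isNone_none, Bool.true_and, h2, Bool.false_eq_true, if_false]
      rw [hc]

theorem select_best_repo_digest_py_spec : Claim_equal_select_best_repo_digest_py := by
  intro repo_digests repository _
  unfold Spec_select_best_repo_digest_py select_best_repo_digest_py select_best_repo_digest_py_alt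
  by_cases hnil : repo_digests = []
  · simp only [hnil, if_true]
  · simp only [hnil, if_false, pvRepoNameA]
    rw [pvAltLoop_eq]
    cases hf : repo_digests.find? (fun d =>
        PySem.Str.startswith d (repository ++ "@") ||
        PySem.Str.startswith d ((if PySem.Str.isIn "/" repository then
          match PySem.List.pyGet? ((PySem.Str.split? repository "/").getD []) (-1) with
          | some x => x | none => "" else repository) ++ "@")) with
    | some d => simp only []
    | none =>
      simp only [Option.none_or]
      by_cases hecr : PySem.Str.isIn "amazonaws.com" repository = true
      · cases hf2 : repo_digests.find? (fun d => PySem.Str.isIn "amazonaws.com" d) with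
        | some d => simp only [hecr, if_true, Option.isSome_some, Bool.and_self]
        | none => simp only [hecr, if_true, Option.isSome_none, Bool.and_false,
            Bool.false_eq_true, if_false]
      · rw [Bool.not_eq_true] at hecr
        simp only [hecr, Bool.false_eq_true, if_false, Bool.false_and]
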